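-- pv_equiv track=rewrite | github.com/btimbermont/adventofcode | 2022/day14/regolith_reservoir.py | point_between
-- ===== SOURCE A (Python) =====
-- def point_between(start: (int, int), end: (int, int)) -> [(int, int)]:
--     all_points = []
--     if start[0] == end[0]:
--         # change y
--         for i in range(min(start[1], end[1]) + 1, max(start[1], end[1])):
--             all_points.append((start[0], i))
--     elif start[1] == end[1]:
--         # change x
--         for i in range(min(start[0], end[0]) + 1, max(start[0], end[0])):
--             all_points.append((i, start[1]))
--     else:
--         raise Exception(f'Diagonal lines aren\'t supported: {start}, {end}')
--     return all_points
-- ===== SOURCE B (Python) =====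
-- def _interior(lo: int, hi: int) -> [int]:
--     """Divide and conquer: integers strictly between lo and hi (lo <= hi), ascending."""
--     if hi - lo <= 1:
--         return []
--     mid = (lo + hi) // 2
--     return _interior(lo, mid) + [mid] + _interior(mid, hi)
--
--
-- def _between(a: int, b: int) -> [int]:
--     return _interior(min(a, b), max(a, b))
--
--
-- def point_between(start: (int, int), end: (int, int)) -> [(int, int)]:
--     if start[0] == end[0]:
--         return [(start[0], y) for y in _between(start[1], end[1])]
--     if start[1] == end[1]:
--         return [(x, start[1]) for x in _between(start[0], end[0])]
--     raise Exception(f'Diagonal lines aren\'t supported: {start}, {end}')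
-- ===== Notes on version B (the rewrite author's own statement) =====
-- stated objective: alternative
-- what changed: Replaces A's linear append loop with a divide-and-conquer recursion: the interior of the 1-D interval is built by splitting at the floor midpoint and concatenating interior(lo,mid) + [mid] + interior(mid,hi).
import Mathlib
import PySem

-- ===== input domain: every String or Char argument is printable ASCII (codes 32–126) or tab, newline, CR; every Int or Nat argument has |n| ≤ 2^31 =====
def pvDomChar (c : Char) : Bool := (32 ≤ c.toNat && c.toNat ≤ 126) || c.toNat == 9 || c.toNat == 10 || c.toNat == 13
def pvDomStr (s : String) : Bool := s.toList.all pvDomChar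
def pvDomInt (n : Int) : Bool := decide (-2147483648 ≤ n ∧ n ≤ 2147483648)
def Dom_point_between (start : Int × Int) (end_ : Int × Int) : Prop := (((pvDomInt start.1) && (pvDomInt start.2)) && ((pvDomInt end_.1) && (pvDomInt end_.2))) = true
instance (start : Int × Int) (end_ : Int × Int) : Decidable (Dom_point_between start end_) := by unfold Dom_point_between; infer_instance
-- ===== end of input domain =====

-- B builds the interior points by divide-and-conquer on the floor midpoint instead of A's linear append loop; objective: alternative.
-- Pre_ excludes diagonal inputs, on which the Python A raises Exception (B raises the same exception).


-- ===== PORT A =====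
def point_between (start : Int × Int) (end_ : Int × Int) : List (Int × Int) :=
  let all_points : List (Int × Int) := []
  if start.1 = end_.1 then
    (PySem.List.pyRange (min start.2 end_.2 + 1) (max start.2 end_.2) 1).foldl
      (fun acc i => acc ++ [(start.1, i)]) all_points
  else if start.2 = end_.2 then
    (PySem.List.pyRange (min start.1 end_.1 + 1) (max start.1 end_.1) 1).foldl
      (fun acc i => acc ++ [(i, start.2)]) all_points
  else []  -- raise Exception(...)  — excluded by Pre_point_between

-- ===== PORT B =====
-- _interior(lo, hi): divide and conquer on the floor midpoint
def pvInterior (lo hi : Int) : List Int :=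
  if _h : hi - lo ≤ 1 then []
  else
    let mid := PySem.Int.floordiv (lo + hi) 2
    pvInterior lo mid ++ [mid] ++ pvInterior mid hi
termination_by (hi - lo).toNat
decreasing_by
  all_goals
    simp only [PySem.Int.floordiv_eq_ediv_of_pos (by norm_num : (0:Int) < 2)] at *
    omega

def pvBetween (a b : Int) : List Int := pvInterior (min a b) (max a b)

def point_between_alt (start : Int × Int) (end_ : Int × Int) : List (Int × Int) :=
  if start.1 = end_.1 then (pvBetween start.2 end_.2).map (fun y => (start.1, y))
  else if start.2 = end_.2 then (pvBetween start.1 end_.1).map (fun x => (x, start.2))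
  else []  -- raise Exception(...)  — excluded by Pre_point_between

-- ===== PRECONDITION & SPEC =====
-- Pre_ excludes exactly the diagonal inputs, on which A raises Exception (B raises the same one).
def Pre_point_between (start : Int × Int) (end_ : Int × Int) : Prop :=
  start.1 = end_.1 ∨ start.2 = end_.2
instance (start : Int × Int) (end_ : Int × Int) : Decidable (Pre_point_between start end_) := by unfold Pre_point_between; infer_instance

def pvWitness_point_between : (Int × Int) × (Int × Int) := ((3, 1), (3, 5))

def Spec_point_between (start : Int × Int) (end_ : Int × Int) (out : List (Int × Int)) : Prop := out = point_between_alt start end_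
instance (start : Int × Int) (end_ : Int × Int) (out : List (Int × Int)) : Decidable (Spec_point_between start end_ out) := by unfold Spec_point_between; infer_instance

-- ===== CLAIM (what is proved, stated in full; the proofs are below) =====
def Claim_equal_point_between : Prop := ∀ (start : Int × Int) (end_ : Int × Int), Dom_point_between start end_ → Pre_point_between start end_ → Spec_point_between start end_ (point_between start end_)

-- ===== LEMMAS AND PROOFS =====

-- A's append loop builds the map of the range.
theorem foldl_append_singleton {α β : Type} (f : α → β) (l : List α) (acc : List β) :
    l.foldl (fun acc i => acc ++ [f i]) acc = acc ++ l.map f := by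
  induction l generalizing acc with
  | nil => simp
  | cons x xs ih => simp [List.foldl, ih, List.append_assoc]

-- B's divide-and-conquer produces exactly the open range (lo, hi).
theorem pvInterior_eq_pyRange (lo hi : Int) :
    pvInterior lo hi = PySem.List.pyRange (lo + 1) hi 1 := by
  by_cases h : hi - lo ≤ 1
  · rw [pvInterior, dif_pos h, PySem.List.pyRange_one_eq_nil (by omega)]
  · rw [pvInterior, dif_neg h]
    simp only [PySem.Int.floordiv_eq_ediv_of_pos (by norm_num : (0:Int) < 2)]
    have hlo : lo + 1 ≤ (lo + hi) / 2 := by omega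
    have hhi : (lo + hi) / 2 + 1 ≤ hi := by omega
    rw [pvInterior_eq_pyRange lo ((lo + hi) / 2),
        pvInterior_eq_pyRange ((lo + hi) / 2) hi,
        PySem.List.pyRange_one_append (lo + 1) ((lo + hi) / 2) hi hlo (by omega),
        PySem.List.pyRange_one_cons (by omega : (lo + hi) / 2 < hi)]
    simp
termination_by (hi - lo).toNat
decreasing_by all_goals omega

theorem pvBetween_eq (a b : Int) :
    pvBetween a b = PySem.List.pyRange (min a b + 1) (max a b) 1 := by
  unfold pvBetween
  rw [pvInterior_eq_pyRange]

-- ===== VERDICT (by name: the statement is the Claim_ definition above) =====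
theorem point_between_spec : Claim_equal_point_between := by
  intro start end_ _ hpre
  unfold Spec_point_between point_between point_between_alt
  by_cases hx : start.1 = end_.1
  · rw [if_pos hx, if_pos hx, pvBetween_eq, foldl_append_singleton]
    simp
  · have hy : start.2 = end_.2 := hpre.resolve_left hx
    rw [if_neg hx, if_neg hx, if_pos hy, if_pos hy, pvBetween_eq, foldl_append_singleton]
    simp
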